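-- pv_equiv track=rewrite | github.com/EnglishGuy69/Advent_Of_Code_2023 | 14. Parabolic Reflector Dish/parabolic_reflector_dish.py | calculate_cycle
-- ===== SOURCE A (Python) =====
-- def calculate_cycle(scores):
--     score_cycle_frequency = None
--     for i in range(1, len(scores)):
--         cycle_0 = scores[-i:]
--         cycle_1 = scores[-2*i:-i]
--         cycle_2 = scores[-3*i:-2*i]
--         if cycle_0 == cycle_1:
--             score_cycle_frequency = i
--             if cycle_2 == cycle_0:
--                 break
--
--     return score_cycle_frequency
-- ===== SOURCE B (Python) =====
-- def calculate_cycle(scores):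
--     n = len(scores)
--     r = scores[::-1]
--     # Z-array of the reversed list: z[j] = longest common prefix of r and r[j:],
--     # built once in O(n) with the classic two-pointer window.
--     z = [0] * n
--     if n:
--         z[0] = n
--     left = right = 0
--     for j in range(1, n):
--         k = min(right - j, z[j - left]) if j < right else 0
--         while j + k < n and r[k] == r[j + k]:
--             k += 1
--         z[j] = k
--         if j + k > right:
--             left, right = j, j + k
--     # selection: z[i] >= i  <=>  the last i scores equal the previous i scores
--     freq = None
--     for i in range(1, n):
--         if 2 * i <= n and z[i] >= i:
--             freq = i
--             if 3 * i <= n and z[2 * i] >= i: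
--                 break
--     return freq
-- ===== Notes on version B (the rewrite author's own statement) =====
-- stated objective: faster
-- what changed: B reverses the list once, builds the Z-array of the reversed list with the linear two-pointer Z-algorithm, and then decides each candidate i by two O(1) array lookups (z[i] >= i and z[2i] >= i) instead of materialising and comparing three fresh tail slices for every i.
import Mathlib
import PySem

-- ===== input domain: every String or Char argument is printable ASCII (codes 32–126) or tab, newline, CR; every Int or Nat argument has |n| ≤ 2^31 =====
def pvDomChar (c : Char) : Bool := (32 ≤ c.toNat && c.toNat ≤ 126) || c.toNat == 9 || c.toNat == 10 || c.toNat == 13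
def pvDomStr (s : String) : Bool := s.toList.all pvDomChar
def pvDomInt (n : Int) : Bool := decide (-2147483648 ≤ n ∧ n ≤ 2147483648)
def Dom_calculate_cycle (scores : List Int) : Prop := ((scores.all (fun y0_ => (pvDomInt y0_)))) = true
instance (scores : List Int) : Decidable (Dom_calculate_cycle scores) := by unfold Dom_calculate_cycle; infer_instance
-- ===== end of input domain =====

-- B reverses the list once, builds the Z-array of the reversed list with the linear two-pointer
-- Z-algorithm, and answers each candidate i with two O(1) lookups (z[i] >= i, z[2i] >= i) instead of
-- comparing three fresh tail slices per i (objective: faster).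

-- ===== PORT A =====
-- the for-loop over range(1, len(scores)) with its 'break' as an early-return recursion over the range list
def pvLoopA (scores : List Int) : List Int → Option Int → Option Int
  | [], freq => freq
  | i :: rest, freq =>
    let cycle0 := PySem.List.slice scores (some (-i)) none
    let cycle1 := PySem.List.slice scores (some (-(2*i))) (some (-i))
    let cycle2 := PySem.List.slice scores (some (-(3*i))) (some (-(2*i)))
    if cycle0 = cycle1 then
      if cycle2 = cycle0 then some i
      else pvLoopA scores rest (some i)
    else pvLoopA scores rest freq

def calculate_cycle (scores : List Int) : Option Int :=
  pvLoopA scores (PySem.List.pyRange 1 (scores.length : Int) 1) none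

-- ===== PORT B =====
-- the inner 'while j + k < n and r[k] == r[j + k]: k += 1' of Source B (n = len(r); indices provably in range)
def pvWhile (r : List Int) (j : Int) (k : Int) : Int :=
  if h : j + k < (r.length : Int) ∧ PySem.List.pyGet? r k = PySem.List.pyGet? r (j + k) then
    pvWhile r j (k + 1)
  else k
termination_by ((r.length : Int) - (j + k)).toNat
decreasing_by obtain ⟨h1, -⟩ := h; omega

-- the Z-building for-loop of Source B; state = (z, left, right); z[j] = k via List.set (j in range)
def pvZloop (r : List Int) : List Int → List Int × Int × Int → List Int × Int × Int
  | [], st => st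
  | j :: rest, (z, left, right) =>
    let k0 : Int := if j < right then min (right - j) (z.getD (j - left).toNat 0) else 0
    let k := pvWhile r j k0
    let z' := z.set j.toNat k
    if right < j + k then pvZloop r rest (z', j, j + k)
    else pvZloop r rest (z', left, right)

-- the selection for-loop of Source B with its 'break' as an early-return recursion over the range list
def pvSelB (z : List Int) (n : Int) : List Int → Option Int → Option Int
  | [], freq => freq
  | i :: rest, freq =>
    if 2*i ≤ n ∧ i ≤ z.getD i.toNat 0 then
      if 3*i ≤ n ∧ i ≤ z.getD (2*i).toNat 0 then some i
      else pvSelB z n rest (some i)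
    else pvSelB z n rest freq

def calculate_cycle_alt (scores : List Int) : Option Int :=
  let n : Int := scores.length
  let r := scores.reverse                         -- scores[::-1]; PySem.List.slice?_none_none_neg_one
  let z0 : List Int := List.replicate scores.length 0
  let z0 := if scores.length ≠ 0 then z0.set 0 n else z0   -- 'if n: z[0] = n'
  let z := (pvZloop r (PySem.List.pyRange 1 n 1) (z0, 0, 0)).1
  pvSelB z n (PySem.List.pyRange 1 n 1) none

-- ===== PRECONDITION & SPEC =====
def Spec_calculate_cycle (scores : List Int) (out : Option Int) : Prop := out = calculate_cycle_alt scores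
instance (scores : List Int) (out : Option Int) : Decidable (Spec_calculate_cycle scores out) := by unfold Spec_calculate_cycle; infer_instance

-- ===== CLAIM (what is proved, stated in full; the proofs are below) =====
def Claim_equal_calculate_cycle : Prop := ∀ (scores : List Int), Dom_calculate_cycle scores → Spec_calculate_cycle scores (calculate_cycle scores)

-- ===== LEMMAS AND PROOFS =====

-- pvLcp xs ys = length of the longest common prefix; the specification of the Z-array entries
def pvLcp : List Int → List Int → Int
  | x :: xs, y :: ys => if x ≠ y then 0 else pvLcp xs ys + 1
  | _, _ => 0

theorem pvLcp_nonneg (xs ys : List Int) : 0 ≤ pvLcp xs ys := by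
  induction xs generalizing ys with
  | nil => simp [pvLcp]
  | cons x xs ih =>
    cases ys with
    | nil => simp [pvLcp]
    | cons y ys =>
      simp only [pvLcp]
      split
      · simp
      · linarith [ih ys]

theorem pvLcp_le_right : ∀ (xs ys : List Int), pvLcp xs ys ≤ (ys.length : Int) := by
  intro xs
  induction xs with
  | nil => intro ys; cases ys <;> simp [pvLcp] <;> omega
  | cons x xs ih =>
    intro ys
    cases ys with
    | nil => simp [pvLcp]
    | cons y ys =>
      simp only [pvLcp]
      split
      · simp; omega
      · have := ih ys; simp [List.length_cons]; push_cast; omega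

theorem pvLcp_ge_iff : ∀ (xs ys : List Int) (k : Nat),
    ((k : Int) ≤ pvLcp xs ys) ↔ (k ≤ xs.length ∧ k ≤ ys.length ∧ xs.take k = ys.take k) := by
  intro xs
  induction xs with
  | nil =>
    intro ys k
    constructor
    · intro h
      have hk : k = 0 := by simpa [pvLcp] using h
      subst hk; simp
    · rintro ⟨h, -, -⟩
      have hk : k = 0 := by simpa using h
      subst hk; simp [pvLcp]
  | cons x xs ih =>
    intro ys k
    cases ys with
    | nil =>
      constructor
      · intro h
        have hk : k = 0 := by simpa [pvLcp] using h
        subst hk; simp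
      · rintro ⟨-, h, -⟩
        have hk : k = 0 := by simpa using h
        subst hk; simp [pvLcp]
    | cons y ys =>
      cases k with
      | zero => simp [pvLcp_nonneg]
      | succ k =>
        simp only [pvLcp]
        split
        · rename_i hne
          constructor
          · intro h; exfalso; omega
          · rintro ⟨-, -, h⟩; simp [List.take_succ_cons] at h; exact absurd h.1 hne
        · rename_i heq
          push Not at heq
          rw [show ((k+1 : Nat) : Int) = (k : Int) + 1 by push_cast; ring]
          constructor
          · intro h
            have := (ih ys k).mp (by omega)
            refine ⟨by simpa using this.1, by simpa using this.2.1, ?_⟩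
            simp [List.take_succ_cons, heq, this.2.2]
          · rintro ⟨h1, h2, h3⟩
            simp [List.take_succ_cons] at h3
            have := (ih ys k).mpr ⟨by simpa using h1, by simpa using h2, h3.2⟩
            omega

theorem pvSeg (scores : List Int) (a b : Nat) (hab : a + b ≤ scores.length) :
    ((scores.drop (scores.length - (a+b))).take b) = ((scores.reverse.drop a).take b).reverse := by
  apply List.ext_getElem
  · simp; omega
  · intro i h1 h2
    simp only [List.getElem_take, List.getElem_drop, List.getElem_reverse, List.length_take,
      List.length_drop, List.length_reverse]
    congr 1
    simp at h1 h2
    omega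

theorem dropRevTake (scores : List Int) (m : Nat) (h2 : m ≤ scores.length) :
    scores.drop (scores.length - m) = (scores.reverse.take m).reverse := by
  have h0 := pvSeg scores 0 m (by omega)
  simp only [Nat.zero_add, List.drop_zero] at h0
  rwa [List.take_of_length_le (by simp; omega)] at h0

theorem condDouble (scores : List Int) (m : Nat) (h1 : 1 ≤ m) (h2 : m < scores.length) :
    (PySem.List.slice scores (some (-(m:Int))) none =
     PySem.List.slice scores (some (-((2*m : Nat):Int))) (some (-(m:Int))))
    ↔ (((2*m : Nat):Int) ≤ (scores.length : Int) ∧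
       (m:Int) ≤ pvLcp scores.reverse (scores.reverse.drop m)) := by
  rw [PySem.List.slice_from_neg_natCast scores m h1]
  have hcl : PySem.List.slice scores (some (-((2*m : Nat):Int))) (some (-(m:Int))) =
      (scores.drop (scores.length - 2*m)).take ((scores.length - m) - (scores.length - 2*m)) := by
    show (scores.drop (PySem.List.clampIdx scores.length (-((2*m:Nat):Int)))).take
        (PySem.List.clampIdx scores.length (-(m:Int)) - PySem.List.clampIdx scores.length (-((2*m:Nat):Int))) = _
    rw [PySem.List.clampIdx_neg_natCast scores.length (2*m) (by omega),
        PySem.List.clampIdx_neg_natCast scores.length m h1]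
  rw [hcl]
  by_cases hc : 2*m ≤ scores.length
  · have e0 := dropRevTake scores m (by omega)
    have e1 : (scores.drop (scores.length - 2*m)).take ((scores.length - m) - (scores.length - 2*m)) =
        ((scores.reverse.drop m).take m).reverse := by
      rw [show (scores.length - m) - (scores.length - 2*m) = m by omega]
      have h3 := pvSeg scores m m (by omega)
      rwa [show m + m = 2*m by ring] at h3
    rw [e0, e1, List.reverse_inj, pvLcp_ge_iff]
    constructor
    · intro h
      refine ⟨by omega, by simp; omega, by simp; omega, h⟩
    · intro h
      exact h.2.2.2
  · constructor
    · intro heq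
      exfalso
      have := congrArg List.length heq
      simp at this
      omega
    · intro ⟨hle, _⟩
      exfalso
      omega

theorem condTriple (scores : List Int) (m : Nat) (h1 : 1 ≤ m) (h2 : m < scores.length)
    (h2m : 2*m ≤ scores.length) :
    (PySem.List.slice scores (some (-((3*m : Nat):Int))) (some (-((2*m : Nat):Int))) =
     PySem.List.slice scores (some (-(m:Int))) none)
    ↔ (((3*m : Nat):Int) ≤ (scores.length : Int) ∧
       (m:Int) ≤ pvLcp scores.reverse (scores.reverse.drop (2*m))) := by
  rw [PySem.List.slice_from_neg_natCast scores m h1]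
  have hcl : PySem.List.slice scores (some (-((3*m : Nat):Int))) (some (-((2*m : Nat):Int))) =
      (scores.drop (scores.length - 3*m)).take ((scores.length - 2*m) - (scores.length - 3*m)) := by
    show (scores.drop (PySem.List.clampIdx scores.length (-((3*m:Nat):Int)))).take
        (PySem.List.clampIdx scores.length (-((2*m:Nat):Int)) - PySem.List.clampIdx scores.length (-((3*m:Nat):Int))) = _
    rw [PySem.List.clampIdx_neg_natCast scores.length (3*m) (by omega),
        PySem.List.clampIdx_neg_natCast scores.length (2*m) (by omega)]
  rw [hcl]
  have e0 := dropRevTake scores m (by omega)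
  by_cases hc : 3*m ≤ scores.length
  · have e1 : (scores.drop (scores.length - 3*m)).take ((scores.length - 2*m) - (scores.length - 3*m)) =
        ((scores.reverse.drop (2*m)).take m).reverse := by
      rw [show (scores.length - 2*m) - (scores.length - 3*m) = m by omega]
      have h3 := pvSeg scores (2*m) m (by omega)
      rwa [show 2*m + m = 3*m by ring] at h3
    rw [e0, e1, List.reverse_inj, pvLcp_ge_iff, eq_comm]
    constructor
    · intro h
      refine ⟨by omega, by simp; omega, by simp; omega, h⟩
    · intro h
      exact h.2.2.2
  · constructor
    · intro heq
      exfalso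
      have := congrArg List.length heq
      simp at this
      omega
    · intro ⟨hle, _⟩
      exfalso
      omega

-- getD through drop, unconditionally
theorem getD_drop (r : List Int) (j t : Nat) : (r.drop j).getD t 0 = r.getD (j + t) 0 := by
  simp [List.getD_eq_getElem?_getD, List.getElem?_drop]

theorem take_eq_iff_pt (xs ys : List Int) (k : Nat) (hx : k ≤ xs.length) (hy : k ≤ ys.length) :
    xs.take k = ys.take k ↔ ∀ t, t < k → xs.getD t 0 = ys.getD t 0 := by
  constructor
  · intro h t ht
    have := congrArg (fun l => l[t]?) h
    simp only [List.getElem?_take, ht, if_pos] at this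
    simp [List.getD_eq_getElem?_getD, this]
  · intro h
    apply List.ext_getElem
    · simp; omega
    · intro i h1 h2
      simp only [List.getElem_take]
      have hi : i < k := by simp at h1; omega
      have := h i hi
      rwa [List.getD_eq_getElem _ _ (by omega), List.getD_eq_getElem _ _ (by omega)] at this

-- the pointwise characterisation of the Z-value at position j
theorem lcp_pt (r : List Int) (j k : Nat) (hj : j ≤ r.length) :
    ((k : Int) ≤ pvLcp r (r.drop j)) ↔
      (j + k ≤ r.length ∧ ∀ t, t < k → r.getD t 0 = r.getD (j + t) 0) := by
  rw [pvLcp_ge_iff]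
  constructor
  · rintro ⟨h1, h2, h3⟩
    simp only [List.length_drop] at h2
    refine ⟨by omega, ?_⟩
    intro t ht
    have := (take_eq_iff_pt r (r.drop j) k h1 (by simp; omega)).mp h3 t ht
    rwa [getD_drop] at this
  · rintro ⟨h1, h2⟩
    refine ⟨by omega, by simp; omega, ?_⟩
    rw [take_eq_iff_pt r (r.drop j) k (by omega) (by simp; omega)]
    intro t ht
    rw [getD_drop]
    exact h2 t ht

theorem pvWhile_eq (r : List Int) (j : Int) (hj1 : 1 ≤ j) (hjn : j < (r.length : Int)) :
    ∀ (fuel : Nat) (k : Int), ((r.length : Int) - (j + k)).toNat ≤ fuel → 0 ≤ k →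
      k ≤ pvLcp r (r.drop j.toNat) → pvWhile r j k = pvLcp r (r.drop j.toNat) := by
  have hL0 := pvLcp_nonneg r (r.drop j.toNat)
  have hLle := pvLcp_le_right r (r.drop j.toNat)
  simp only [List.length_drop] at hLle
  intro fuel
  induction fuel with
  | zero =>
    intro k hf hk0 hk
    -- fuel exhausted: k must already be the lcp and the guard must fail
    rw [pvWhile]
    rw [dif_neg]
    · -- k = lcp: from k ≤ lcp ≤ len - j and len - (j+k) ≤ 0
      omega
    · rintro ⟨h1, -⟩; omega
  | succ fuel ih =>
    intro k hf hk0 hk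
    rw [pvWhile]
    by_cases hc : j + k < (r.length : Int) ∧ PySem.List.pyGet? r k = PySem.List.pyGet? r (j + k)
    · rw [dif_pos hc]
      -- the guard holds, so k < lcp
      have hkn : k < (r.length : Int) := by omega
      have hjk : 0 ≤ j + k := by omega
      have e1 := PySem.List.pyGet?_eq_some_getElem (xs := r) (i := k) hk0 (by omega)
      have e2 := PySem.List.pyGet?_eq_some_getElem (xs := r) (i := j + k) hjk (by omega)
      rw [e1, e2] at hc
      have hget : r.getD k.toNat 0 = r.getD (j.toNat + k.toNat) 0 := by
        rw [List.getD_eq_getElem _ _ (by omega), List.getD_eq_getElem _ _ (by omega)]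
        have := Option.some.inj hc.2
        simpa [show (j + k).toNat = j.toNat + k.toNat by omega] using this
      have hsucc : ((k.toNat + 1 : Nat) : Int) ≤ pvLcp r (r.drop j.toNat) := by
        rw [lcp_pt r j.toNat (k.toNat + 1) (by omega)]
        refine ⟨by omega, ?_⟩
        intro t ht
        rcases Nat.lt_or_ge t k.toNat with h | h
        · exact ((lcp_pt r j.toNat k.toNat (by omega)).mp (by omega)).2 t h
        · have : t = k.toNat := by omega
          subst this
          exact hget
      exact ih (k + 1) (by omega) (by omega) (by omega)
    · rw [dif_neg hc]
      -- the guard fails, so k = lcp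
      by_contra hne
      have hklt : k < pvLcp r (r.drop j.toNat) := by omega
      have := (lcp_pt r j.toNat (k.toNat + 1) (by omega)).mp (by omega)
      have hmatch := this.2 k.toNat (by omega)
      apply hc
      refine ⟨by omega, ?_⟩
      rw [PySem.List.pyGet?_eq_some_getElem (xs := r) (i := k) hk0 (by omega),
          PySem.List.pyGet?_eq_some_getElem (xs := r) (i := j + k) (by omega) (by omega)]
      rw [List.getD_eq_getElem _ _ (by omega), List.getD_eq_getElem _ _ (by omega)] at hmatch
      simpa [show (j + k).toNat = j.toNat + k.toNat by omega] using hmatch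

theorem getD_set_self (l : List Int) (i : Nat) (a : Int) (h : i < l.length) :
    (l.set i a).getD i 0 = a := by
  simp [List.getD_eq_getElem?_getD, List.getElem?_set, h]

theorem getD_set_ne (l : List Int) (i m : Nat) (a : Int) (h : i ≠ m) :
    (l.set i a).getD m 0 = l.getD m 0 := by
  simp [List.getD_eq_getElem?_getD, List.getElem?_set, h]

-- invariant proof for the Z-building loop: the finished array holds all the lcp values
theorem zloop_correct (r : List Int) :
    ∀ (fuel : Nat) (j : Int) (z : List Int) (left right : Int),
    ((r.length : Int) - j).toNat ≤ fuel →
    1 ≤ j →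
    z.length = r.length →
    (∀ m : Nat, 1 ≤ m → (m : Int) < j → z.getD m 0 = pvLcp r (r.drop m)) →
    ((left = 0 ∧ right = 0) ∨
     (1 ≤ left ∧ left < j ∧ right - left ≤ pvLcp r (r.drop left.toNat))) →
    ∀ m : Nat, 1 ≤ m → m < r.length →
      (pvZloop r (PySem.List.pyRange j (r.length : Int) 1) (z, left, right)).1.getD m 0
        = pvLcp r (r.drop m) := by
  intro fuel
  induction fuel with
  | zero =>
    intro j z left right hf h1 hlen hz hw m hm1 hm2
    have hjn : ¬ j < (r.length : Int) := by omega
    rw [PySem.List.pyRange_one_eq_nil (by omega)]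
    exact hz m hm1 (by omega)
  | succ fuel ih =>
    intro j z left right hf h1 hlen hz hw m hm1 hm2
    by_cases hjn : j < (r.length : Int)
    case neg =>
      rw [PySem.List.pyRange_one_eq_nil (by omega)]
      exact hz m hm1 (by omega)
    case pos =>
      rw [PySem.List.pyRange_one_cons hjn]
      simp only [pvZloop]
      set k0 : Int := if j < right then min (right - j) (z.getD (j - left).toNat 0) else 0 with hk0def
      have hL0 := pvLcp_nonneg r (r.drop j.toNat)
      -- k0 is a valid starting point: 0 ≤ k0 ≤ lcp at j
      have hk0 : 0 ≤ k0 ∧ k0 ≤ pvLcp r (r.drop j.toNat) := by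
        rw [hk0def]
        by_cases hjr : j < right
        · rw [if_pos hjr]
          rcases hw with ⟨hl0, hr0⟩ | ⟨hl1, hlj, hlw⟩
          · omega
          · have hq1 : (1 : Int) ≤ j - left := by omega
            have hqj : j - left < j := by omega
            have hzq := hz (j - left).toNat (by omega) (by omega)
            rw [hzq]
            have hLq0 := pvLcp_nonneg r (r.drop (j - left).toNat)
            have hLlle := pvLcp_le_right r (r.drop left.toNat)
            simp only [List.length_drop] at hLlle
            refine ⟨by omega, ?_⟩
            -- min (right - j) (lcp q) ≤ lcp j, pointwise
            set k0' := min (right - j) (pvLcp r (r.drop (j - left).toNat)) with hk0'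
            have hk0'0 : 0 ≤ k0' := by omega
            have hrlen : right ≤ (r.length : Int) := by omega
            rw [show k0' = ((k0'.toNat : Nat) : Int) by omega]
            rw [lcp_pt r j.toNat k0'.toNat (by omega)]
            refine ⟨by omega, ?_⟩
            intro t ht
            -- r[t] = r[q + t] from lcp q
            have hA := (lcp_pt r (j - left).toNat k0'.toNat (by omega)).mp (by omega)
            have e1 := hA.2 t ht
            -- r[s] = r[left + s] for s < right - left, from the window
            have hB := (lcp_pt r left.toNat (right - left).toNat (by omega)).mp (by omega)
            have e2 := hB.2 ((j - left).toNat + t) (by omega)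
            rw [← e1, show left.toNat + ((j - left).toNat + t) = j.toNat + t by omega] at e2
            exact e2
        · rw [if_neg hjr]; omega
      -- the while loop computes exactly the lcp at j
      have hk := pvWhile_eq r j h1 hjn ((r.length : Int) - (j + k0)).toNat k0 (le_refl _) hk0.1 hk0.2
      rw [hk]
      set L := pvLcp r (r.drop j.toNat) with hLdef
      have hLle := pvLcp_le_right r (r.drop j.toNat)
      simp only [List.length_drop] at hLle
      -- new z-correctness hypothesis at j + 1
      have hz' : ∀ m : Nat, 1 ≤ m → (m : Int) < j + 1 →
          (z.set j.toNat L).getD m 0 = pvLcp r (r.drop m) := by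
        intro m' hm'1 hm'2
        by_cases hmj : m' = j.toNat
        · subst hmj
          rw [getD_set_self _ _ _ (by omega)]
        · rw [getD_set_ne _ _ _ _ (fun h => hmj h.symm)]
          exact hz m' hm'1 (by omega)
      have hlen' : (z.set j.toNat L).length = r.length := by simp [hlen]
      by_cases hupd : right < j + L
      · rw [if_pos hupd]
        exact ih (j + 1) _ j (j + L) (by omega) (by omega) hlen' hz'
          (Or.inr ⟨by omega, by omega, by omega⟩) m hm1 hm2
      · rw [if_neg hupd]
        refine ih (j + 1) _ left right (by omega) (by omega) hlen' hz' ?_ m hm1 hm2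
        rcases hw with ⟨hl0, hr0⟩ | ⟨hl1, hlj, hlw⟩
        · exact Or.inl ⟨hl0, hr0⟩
        · exact Or.inr ⟨hl1, by omega, hlw⟩

-- the selection loops agree: A's slice comparisons ↔ B's Z-array lookups
theorem sel_eq (scores : List Int) (z : List Int)
    (hz : ∀ m : Nat, 1 ≤ m → m < scores.length →
      z.getD m 0 = pvLcp scores.reverse (scores.reverse.drop m)) :
    ∀ (is : List Int), (∀ i ∈ is, 1 ≤ i ∧ i < (scores.length : Int)) → ∀ freq,
    pvLoopA scores is freq = pvSelB z (scores.length : Int) is freq := by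
  intro is
  induction is with
  | nil => intro _ freq; rfl
  | cons i rest ihsel =>
    intro h freq
    obtain ⟨hi1, hi2⟩ := h i List.mem_cons_self
    have hrest := fun j hj => h j (List.mem_cons_of_mem _ hj)
    obtain ⟨m, rfl⟩ : ∃ m : Nat, i = (m : Int) := ⟨i.toNat, (Int.toNat_of_nonneg (by omega)).symm⟩
    have hm1 : 1 ≤ m := by exact_mod_cast hi1
    have hm2 : m < scores.length := by exact_mod_cast hi2
    simp only [pvLoopA, pvSelB]
    rw [show (2*((m:Nat):Int)) = (((2*m : Nat)):Int) by push_cast; ring,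
        show (3*((m:Nat):Int)) = (((3*m : Nat)):Int) by push_cast; ring]
    have hdiff : (PySem.List.slice scores (some (-(m:Int))) none =
        PySem.List.slice scores (some (-((2*m : Nat):Int))) (some (-(m:Int)))) ↔
        (((2*m : Nat):Int) ≤ (scores.length : Int) ∧
         ((m:Nat):Int) ≤ z.getD ((m:Int)).toNat 0) := by
      rw [condDouble scores m hm1 hm2, show ((m:Int)).toNat = m by omega, hz m hm1 hm2]
    by_cases hd : ((2*m : Nat):Int) ≤ (scores.length : Int) ∧ ((m:Nat):Int) ≤ z.getD ((m:Int)).toNat 0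
    · have h2m : 2*m ≤ scores.length := by exact_mod_cast hd.1
      have htiff : (PySem.List.slice scores (some (-((3*m : Nat):Int))) (some (-((2*m : Nat):Int))) =
          PySem.List.slice scores (some (-(m:Int))) none) ↔
          (((3*m : Nat):Int) ≤ (scores.length : Int) ∧
           ((m:Nat):Int) ≤ z.getD (((2*m : Nat):Int)).toNat 0) := by
        rw [condTriple scores m hm1 hm2 h2m]
        constructor
        · rintro ⟨h3, hl⟩
          have h2mlt : 2*m < scores.length := by
            have : (3*m : Int) ≤ (scores.length : Int) := by exact_mod_cast h3
            omega
          rw [show (((2*m : Nat):Int)).toNat = 2*m by omega, hz (2*m) (by omega) h2mlt]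
          exact ⟨h3, hl⟩
        · rintro ⟨h3, hl⟩
          have h2mlt : 2*m < scores.length := by
            have : (3*m : Int) ≤ (scores.length : Int) := by exact_mod_cast h3
            omega
          rw [show (((2*m : Nat):Int)).toNat = 2*m by omega, hz (2*m) (by omega) h2mlt] at hl
          exact ⟨h3, hl⟩
      rw [if_pos (hdiff.mpr hd), if_pos hd]
      by_cases ht : ((3*m : Nat):Int) ≤ (scores.length : Int) ∧
          ((m:Nat):Int) ≤ z.getD (((2*m : Nat):Int)).toNat 0
      · rw [if_pos (htiff.mpr ht), if_pos ht]
      · rw [if_neg (fun hh => ht (htiff.mp hh)), if_neg ht]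
        exact ihsel hrest _
    · rw [if_neg (fun hh => hd (hdiff.mp hh)), if_neg hd]
      exact ihsel hrest _

-- ===== VERDICT (by name: the statement is the Claim_ definition above) =====
theorem calculate_cycle_spec : Claim_equal_calculate_cycle := by
  intro scores _
  show calculate_cycle scores = calculate_cycle_alt scores
  have halt : calculate_cycle_alt scores =
      pvSelB ((pvZloop scores.reverse (PySem.List.pyRange 1 (scores.length : Int) 1)
          ((if scores.length ≠ 0 then
              (List.replicate scores.length (0:Int)).set 0 (scores.length : Int)
            else List.replicate scores.length 0), 0, 0)).1)
        (scores.length : Int) (PySem.List.pyRange 1 (scores.length : Int) 1) none := rfl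
  rw [halt]
  have hz := zloop_correct scores.reverse ((scores.reverse.length : Int) - 1).toNat 1
    (if scores.length ≠ 0 then
        (List.replicate scores.length (0:Int)).set 0 (scores.length : Int)
      else List.replicate scores.length 0) 0 0 (le_refl _) (le_refl _)
    (by split <;> simp) (by intro m hm1 hm2; omega) (Or.inl ⟨rfl, rfl⟩)
  simp only [List.length_reverse] at hz
  exact sel_eq scores _ (fun m hm1 hm2 => hz m hm1 hm2) _
    (fun i hi => by
      have := PySem.List.mem_pyRange_one.mp hi
      exact ⟨this.1, this.2⟩) none
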